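-- pv_equiv track=rewrite | github.com/4uffin/projectsspace | python/cliassistant/iris.py | get_unit_type
-- ===== SOURCE A (Python) =====
-- UNIT_CONVERSION_FACTORS = {
--     "length": {
--         "meter": 1.0, "m": 1.0,
--         "kilometer": 1000.0, "km": 1000.0,
--         "centimeter": 0.01, "cm": 0.01,
--         "millimeter": 0.001, "mm": 0.001,
--         "mile": 1609.34, "mi": 1609.34,
--         "yard": 0.9144, "yd": 0.9144,
--         "foot": 0.3048, "ft": 0.3048,
--         "inch": 0.0254, "in": 0.0254
--     },
--     "mass": {
--         "kilogram": 1.0, "kg": 1.0,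
--         "gram": 0.001, "g": 0.001,
--         "pound": 0.453592, "lbs": 0.453592, "lb": 0.453592,
--         "ounce": 0.0283495, "oz": 0.0283495
--     },
--     "volume": {
--         "liter": 1.0, "l": 1.0,
--         "milliliter": 0.001, "ml": 0.001,
--         "gallon": 3.78541, "gal": 3.78541,
--         "quart": 0.946353, "qt": 0.946353,
--         "pint": 0.473176, "pt": 0.473176
--     }
-- }
--
-- def get_unit_type(unit):
--     """Determines the type of unit (e.g., length, mass, volume, temperature)."""
--     unit_lower = unit.lower()
--     for unit_type, units in UNIT_CONVERSION_FACTORS.items():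
--         if unit_lower in units:
--             return unit_type
--
--     if unit_lower in ["celsius", "fahrenheit", "kelvin", "c", "f", "k"]:
--         return "temperature"
--
--     return None
-- ===== SOURCE B (Python) =====
-- # Flat lookup table: every unit name mapped to its type, built once at module load.
-- _UNIT_TO_TYPE = {}
-- for _t, _units in [
--     ("length", ["meter", "m", "kilometer", "km", "centimeter", "cm",
--                 "millimeter", "mm", "mile", "mi", "yard", "yd",
--                 "foot", "ft", "inch", "in"]),
--     ("mass", ["kilogram", "kg", "gram", "g", "pound", "lbs", "lb",
--               "ounce", "oz"]),
--     ("volume", ["liter", "l", "milliliter", "ml", "gallon", "gal",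
--                 "quart", "qt", "pint", "pt"]),
--     ("temperature", ["celsius", "fahrenheit", "kelvin", "c", "f", "k"]),
-- ]:
--     for _u in _units:
--         _UNIT_TO_TYPE[_u] = _t
--
--
-- def get_unit_type(unit):
--     """Determines the type of unit (e.g., length, mass, volume, temperature)."""
--     return _UNIT_TO_TYPE.get(unit.lower())
-- ===== Notes on version B (the rewrite author's own statement) =====
-- stated objective: simpler
-- what changed: Replaces the per-call scan over the nested category dicts plus the separate temperature list check with a single flat unit-to-type dict built once at module load, so the function body is one indexed lookup.
import Mathlib
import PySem

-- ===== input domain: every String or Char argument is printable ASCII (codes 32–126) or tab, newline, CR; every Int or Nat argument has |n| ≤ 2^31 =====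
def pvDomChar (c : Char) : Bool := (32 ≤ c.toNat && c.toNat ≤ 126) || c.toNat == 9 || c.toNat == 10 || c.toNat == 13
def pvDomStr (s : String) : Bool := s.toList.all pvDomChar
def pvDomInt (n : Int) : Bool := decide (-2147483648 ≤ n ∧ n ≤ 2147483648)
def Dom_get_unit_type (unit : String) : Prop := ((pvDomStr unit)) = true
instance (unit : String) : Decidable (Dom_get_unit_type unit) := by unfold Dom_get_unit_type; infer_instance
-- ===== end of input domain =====

-- B builds a single flat unit→type dict once so the lookup is one indexed access instead of a scan over category dicts plus a temperature list.


-- ===== PORT A =====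
-- UNIT_CONVERSION_FACTORS: only the KEYS of the inner dicts are ever used by get_unit_type
-- (the float conversion factors are dead for this function), so each inner dict is ported
-- as its key list in insertion order; 'unit_lower in units' is membership in those keys.
def unitConversionFactors : List (String × List String) :=
  [ ("length", ["meter", "m", "kilometer", "km", "centimeter", "cm",
                "millimeter", "mm", "mile", "mi", "yard", "yd",
                "foot", "ft", "inch", "in"]),
    ("mass", ["kilogram", "kg", "gram", "g", "pound", "lbs", "lb",
              "ounce", "oz"]),
    ("volume", ["liter", "l", "milliliter", "ml", "gallon", "gal",
                "quart", "qt", "pint", "pt"]) ]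

-- the 'for unit_type, units in …: if unit_lower in units: return unit_type' loop
def unitTypeLoop : List (String × List String) → String → Option String
  | [], _ => none
  | (t, ks) :: rest, ul => if ks.contains ul then some t else unitTypeLoop rest ul

def get_unit_type (unit : String) : Option String :=
  let unit_lower := PySem.Str.lower unit
  match unitTypeLoop unitConversionFactors unit_lower with
  | some t => some t
  | none =>
    if ["celsius", "fahrenheit", "kelvin", "c", "f", "k"].contains unit_lower then
      some "temperature"
    else none

-- ===== PORT B =====
-- the module-load loop of Source B: category → unit list, temperature included
def unitTypeData : List (String × List String) :=
  unitConversionFactors ++ [("temperature", ["celsius", "fahrenheit", "kelvin", "c", "f", "k"])]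

-- _UNIT_TO_TYPE, built by the double loop '_UNIT_TO_TYPE[_u] = _t'
def unitToType : PySem.Dict String String :=
  unitTypeData.foldl (fun d p => p.2.foldl (fun d u => d.insert u p.1) d) PySem.Dict.empty

def get_unit_type_alt (unit : String) : Option String :=
  unitToType.get? (PySem.Str.lower unit)

-- ===== PRECONDITION & SPEC =====
def Spec_get_unit_type (unit : String) (out : Option String) : Prop := out = get_unit_type_alt unit
instance (unit : String) (out : Option String) : Decidable (Spec_get_unit_type unit out) := by unfold Spec_get_unit_type; infer_instance

-- ===== CLAIM (what is proved, stated in full; the proofs are below) =====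
def Claim_equal_get_unit_type : Prop := ∀ (unit : String), Dom_get_unit_type unit → Spec_get_unit_type unit (get_unit_type unit)

-- ===== LEMMAS AND PROOFS =====

set_option maxRecDepth 4096

-- the built dict, as the flat association list it evaluates to (all 46 keys are distinct)
lemma unitToType_eq :
    unitToType = PySem.Dict.mk
      ((["meter", "m", "kilometer", "km", "centimeter", "cm", "millimeter", "mm",
         "mile", "mi", "yard", "yd", "foot", "ft", "inch", "in"].map (·, "length")) ++
       (["kilogram", "kg", "gram", "g", "pound", "lbs", "lb", "ounce", "oz"].map (·, "mass")) ++
       (["liter", "l", "milliliter", "ml", "gallon", "gal", "quart", "qt",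
         "pint", "pt"].map (·, "volume")) ++
       ((["celsius", "fahrenheit", "kelvin", "c", "f", "k"].map (·, "temperature")) ++ [])) := by
  decide

-- looking a key up in a block of pairs that all carry the same value is a membership test
lemma get?_mk_map_append (ks : List String) (t : String) (rest : List (String × String))
    (s : String) :
    (PySem.Dict.mk (ks.map (·, t) ++ rest)).get? s =
      if ks.contains s then some t else (PySem.Dict.mk rest).get? s := by
  induction ks with
  | nil => simp
  | cons k ks ih =>
    simp only [List.map_cons, List.cons_append, PySem.Dict.get?_mk_cons, List.contains_cons, ih]
    by_cases h : s = k
    · simp [h]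
    · simp [h, Ne.symm h]

theorem get_unit_type_eq_alt (unit : String) :
    get_unit_type unit = get_unit_type_alt unit := by
  unfold get_unit_type get_unit_type_alt
  generalize PySem.Str.lower unit = s
  rw [unitToType_eq]
  simp only [List.append_assoc]
  rw [get?_mk_map_append, get?_mk_map_append, get?_mk_map_append, get?_mk_map_append]
  simp only [unitTypeLoop, unitConversionFactors]
  split_ifs <;> simp_all [PySem.Dict.get?]

-- ===== VERDICT (by name: the statement is the Claim_ definition above) =====
theorem get_unit_type_spec : Claim_equal_get_unit_type := by
  intro unit _
  unfold Spec_get_unit_type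
  exact get_unit_type_eq_alt unit
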